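-- pv_equiv track=rewrite | github.com/leiminray/md-to-pdf | scripts/md_to_pdf.py | _fence_truncate
-- ===== SOURCE A (Python) =====
-- def _fence_truncate(
--     body_lines: list[str],
--     max_lines: int,
--     max_chars: int,
-- ) -> tuple[list[str], bool]:
--     """Return (lines, truncated) when exceeding line or character limits (UTF-8 code points via len())."""
--     max_lines = max(1, max_lines)
--     max_chars = max(1, max_chars)
--     out: list[str] = []
--     for line in body_lines:
--         if len(out) >= max_lines:
--             return out, True
--         trial = out + [line]
--         blob = "\n".join(trial)
--         if len(blob) > max_chars:
--             prefix = "\n".join(out)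
--             sep = 1 if out else 0
--             remain = max_chars - len(prefix) - sep
--             if remain > 0:
--                 out.append(line[:remain])
--             return out, True
--         out.append(line)
--     return out, False
-- ===== SOURCE B (Python) =====
-- def _fence_truncate(
--     body_lines: list[str],
--     max_lines: int,
--     max_chars: int,
-- ) -> tuple[list[str], bool]:
--     """Staged re-implementation: compute the joined length of every prefix of the
--     first min(max_lines, n) lines in one pass, derive the cut index k by counting
--     the prefixes within the character budget, then build the result by slicing.
--     No incremental output construction, no per-line re-join of the blob."""
--     ml = max(1, max_lines)
--     mc = max(1, max_chars)
--     n = len(body_lines)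
--     # at most mc+1 lines can matter: every further prefix costs >= 1 char per line
--     m = min(ml, n, mc + 1)
--     # pref[i] = len("\n".join(body_lines[:i+1])) for the first m prefixes
--     pref = []
--     acc = 0
--     for line in body_lines[:m]:
--         acc += (1 if pref else 0) + len(line)
--         pref.append(acc)
--     # pref is nondecreasing, so this count is the largest k with pref[k-1] <= mc
--     k = sum(1 for p in pref if p <= mc)
--     if k == n:
--         return list(body_lines), False
--     if k == ml:
--         return body_lines[:k], True
--     out = body_lines[:k]
--     remain = mc - (pref[k - 1] if k else 0) - (1 if k else 0)
--     if remain > 0: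
--         out.append(body_lines[k][:remain])
--     return out, True
-- ===== Notes on version B (the rewrite author's own statement) =====
-- stated objective: faster
-- what changed: B is a staged algorithm: one pass computes the joined length of every prefix of the first min(max_lines, n, max_chars+1) lines (at most max_chars+1 lines can ever fit), the cut index k is then derived by counting the prefixes within the character budget, and the result is built by slicing - instead of A's greedy loop that re-joins the whole accumulated blob on every line.
import Mathlib
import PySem

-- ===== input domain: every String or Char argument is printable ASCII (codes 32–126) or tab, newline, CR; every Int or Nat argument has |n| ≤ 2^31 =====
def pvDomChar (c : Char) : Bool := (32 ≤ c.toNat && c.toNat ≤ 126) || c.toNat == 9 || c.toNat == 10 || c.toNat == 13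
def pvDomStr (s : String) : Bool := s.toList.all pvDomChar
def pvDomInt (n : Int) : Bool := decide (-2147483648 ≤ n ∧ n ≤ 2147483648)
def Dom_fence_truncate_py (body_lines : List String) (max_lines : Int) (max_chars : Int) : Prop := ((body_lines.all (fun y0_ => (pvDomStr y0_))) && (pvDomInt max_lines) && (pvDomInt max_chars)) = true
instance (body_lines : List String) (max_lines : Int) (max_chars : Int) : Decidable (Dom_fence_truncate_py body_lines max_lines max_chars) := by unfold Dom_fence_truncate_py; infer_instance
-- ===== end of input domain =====

-- B replaces A's greedy per-line re-join loop by a staged algorithm (prefix joined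
-- lengths in one pass, cut index by counting, result by slicing); objective: faster.

-- ===== PORT A =====
-- loop of A: carries the accumulator `out`, re-joins it each iteration
def fenceA_go (ml mc : Int) (out : List String) : List String → List String × Bool
  | [] => (out, false)
  | line :: rest =>
    if (out.length : Int) ≥ ml then (out, true)
    else
      let trial := out ++ [line]
      let blob := PySem.Str.join "\n" trial
      if PySem.Str.len blob > mc then
        let pre := PySem.Str.join "\n" out
        let sep : Int := if out.isEmpty then 0 else 1
        let remain := mc - PySem.Str.len pre - sep
        if remain > 0 then (out ++ [PySem.Str.slice line none (some remain)], true)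
        else (out, true)
      else fenceA_go ml mc (out ++ [line]) rest

def fence_truncate_py (body_lines : List String) (max_lines : Int) (max_chars : Int) : List String × Bool :=
  fenceA_go (max 1 max_lines) (max 1 max_chars) [] body_lines

-- ===== PORT B =====
-- loop of Source B building pref: `acc += (1 if pref else 0) + len(line); pref.append(acc)`
def fenceB_pref : List String → Int → List Int → List Int
  | [], _, pref => pref
  | l :: ls, acc, pref =>
    let acc' := acc + (if pref.isEmpty then 0 else 1) + PySem.Str.len l
    fenceB_pref ls acc' (pref ++ [acc'])

def fence_truncate_py_alt (body_lines : List String) (max_lines : Int) (max_chars : Int) : List String × Bool :=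
  let ml := max 1 max_lines
  let mc := max 1 max_chars
  let n : Int := body_lines.length
  -- at most mc+1 lines can matter: every further prefix costs >= 1 char per line
  let m := min (min ml n) (mc + 1)
  let pref := fenceB_pref (PySem.List.slice body_lines none (some m)) 0 []
  -- k = sum(1 for p in pref if p <= mc)
  let k : Int := (pref.countP (fun p => decide (p ≤ mc)) : Int)
  if k = n then (body_lines, false)
  else if k = ml then (PySem.List.slice body_lines none (some k), true)
  else
    let out := PySem.List.slice body_lines none (some k)
    -- pref[k-1] / body_lines[k]: always in range here, so the .getD default is never used
    let pk : Int := if k = 0 then 0 else (PySem.List.pyGet? pref (k - 1)).getD 0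
    let remain := mc - pk - (if k = 0 then 0 else 1)
    if remain > 0 then
      (out ++ [PySem.Str.slice ((PySem.List.pyGet? body_lines k).getD "") none (some remain)], true)
    else (out, true)

-- ===== PRECONDITION & SPEC =====
def Spec_fence_truncate_py (body_lines : List String) (max_lines : Int) (max_chars : Int) (out : List String × Bool) : Prop := out = fence_truncate_py_alt body_lines max_lines max_chars
instance (body_lines : List String) (max_lines : Int) (max_chars : Int) (out : List String × Bool) : Decidable (Spec_fence_truncate_py body_lines max_lines max_chars out) := by unfold Spec_fence_truncate_py; infer_instance

-- ===== CLAIM (what is proved, stated in full; the proofs are below) =====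
def Claim_equal_fence_truncate_py : Prop := ∀ (body_lines : List String) (max_lines : Int) (max_chars : Int), Dom_fence_truncate_py body_lines max_lines max_chars → Spec_fence_truncate_py body_lines max_lines max_chars (fence_truncate_py body_lines max_lines max_chars)

-- ===== LEMMAS AND PROOFS =====

-- Proof-only helper: A's greedy loop with an incrementally maintained running count.
def fenceGreedy (ml mc : Int) (out : List String) (total : Int) : List String → List String × Bool
  | [] => (out, false)
  | line :: rest =>
    if (out.length : Int) ≥ ml then (out, true)
    else
      let sep : Int := if out.isEmpty then 0 else 1
      if total + sep + PySem.Str.len line > mc then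
        let remain := mc - total - sep
        if remain > 0 then (out ++ [PySem.Str.slice line none (some remain)], true)
        else (out, true)
      else fenceGreedy ml mc (out ++ [line]) (total + sep + PySem.Str.len line) rest

-- joining with one more element appended: structural form
theorem chars_join_snoc (sep : List Char) : ∀ (xs : List (List Char)) (l : List Char),
    PySem.Chars.join sep (xs ++ [l]) =
      if xs.isEmpty then l else PySem.Chars.join sep xs ++ sep ++ l := by
  intro xs
  induction xs with
  | nil => intro l; simp [PySem.Chars.join_singleton]
  | cons x xs ih =>
    intro l
    cases xs with
    | nil => simp [PySem.Chars.join_cons_cons, PySem.Chars.join_singleton]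
    | cons y ys =>
      have h := ih l
      simp only [List.cons_append, List.isEmpty_cons, Bool.false_eq_true, if_false] at h
      simp only [List.cons_append, PySem.Chars.join_cons_cons, h, List.isEmpty_cons,
        Bool.false_eq_true, if_false]
      simp [List.append_assoc]

-- the invariant step: length of the joined snoc
theorem len_join_snoc (out : List String) (line : String) :
    PySem.Str.len (PySem.Str.join "\n" (out ++ [line])) =
      PySem.Str.len (PySem.Str.join "\n" out) + (if out.isEmpty then 0 else 1) + PySem.Str.len line := by
  have hmap : (out ++ [line]).map String.toList = out.map String.toList ++ [line.toList] := by
    simp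
  have hemp : (out.map String.toList).isEmpty = out.isEmpty := by
    cases out <;> simp
  rw [PySem.Str.len_eq, PySem.Str.len_eq, PySem.Str.len_eq, PySem.Str.toList_join,
    PySem.Str.toList_join, hmap, chars_join_snoc]
  by_cases h : out.isEmpty
  · have hout : out = [] := by simpa using h
    subst hout
    simp [PySem.Chars.join_nil]
  · simp only [hemp, h, if_neg, Bool.false_eq_true, not_false_iff]
    push_cast
    simp only [List.length_append]
    simp only [List.length_cons, List.length_nil]
    push_cast
    omega

theorem len_join_nil : PySem.Str.len (PySem.Str.join "\n" ([] : List String)) = 0 := by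
  decide

-- A's loop equals the greedy loop whenever the running count is the joined length of `out`
theorem goAB (ml mc : Int) : ∀ (rest out : List String),
    fenceA_go ml mc out rest = fenceGreedy ml mc out (PySem.Str.len (PySem.Str.join "\n" out)) rest := by
  intro rest
  induction rest with
  | nil => intro out; rfl
  | cons line rest ih =>
    intro out
    simp only [fenceA_go, fenceGreedy]
    rw [len_join_snoc]
    by_cases he : out.isEmpty <;>
      simp only [he, if_true, Bool.false_eq_true, if_false] <;>
      (split_ifs <;> try rfl) <;>
      (rw [ih, len_join_snoc]; simp [he])

-- proof-side form of Source B's prefix list; `emp` = "nothing accumulated yet, no separator"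
def prefs : List String → Int → Bool → List Int
  | [], _, _ => []
  | l :: ls, acc, emp =>
    (acc + (if emp then 0 else 1) + PySem.Str.len l) ::
      prefs ls (acc + (if emp then 0 else 1) + PySem.Str.len l) false

theorem fenceB_pref_eq : ∀ (ls : List String) (acc : Int) (pref : List Int),
    fenceB_pref ls acc pref = pref ++ prefs ls acc pref.isEmpty := by
  intro ls
  induction ls with
  | nil => intro acc pref; simp [fenceB_pref, prefs]
  | cons l ls ih =>
    intro acc pref
    simp only [fenceB_pref, prefs, ih]
    by_cases h : pref.isEmpty
    · have : pref = [] := by simpa using h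
      subst this; simp
    · have he : ∀ (x : Int), (pref ++ [x]).isEmpty = false := by
        intro x; cases pref <;> simp
      simp [h, he]

theorem str_len_nonneg (s : String) : 0 ≤ PySem.Str.len s := by
  rw [PySem.Str.len_eq]; positivity

theorem prefs_ge : ∀ (ls : List String) (acc x : Int), x ∈ prefs ls acc false → acc ≤ x := by
  intro ls
  induction ls with
  | nil => intro acc x hx; simp [prefs] at hx
  | cons l ls ih =>
    intro acc x hx
    simp only [prefs, List.mem_cons] at hx
    have hl := str_len_nonneg l
    rcases hx with h | h
    · omega
    · have := ih (acc + 1 + PySem.Str.len l) x h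
      omega

-- the closed-form right-hand side the greedy loop computes
def rhs (ml mc : Int) (out : List String) (total : Int) (rest : List String) : List String × Bool :=
  let m : Int := min (ml - out.length) rest.length
  let pref := prefs (rest.take m.toNat) total out.isEmpty
  let k : Nat := pref.countP (fun p => decide (p ≤ mc))
  if (k : Int) = rest.length then (out ++ rest, false)
  else if (k : Int) = ml - out.length then (out ++ rest.take k, true)
  else
    let pk : Int := if k = 0 then total else pref.getD (k - 1) 0
    let sep : Int := if k = 0 ∧ out.isEmpty then 0 else 1
    let remain := mc - pk - sep
    if remain > 0 then
      (out ++ rest.take k ++ [PySem.Str.slice (rest.getD k "") none (some remain)], true)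
    else (out ++ rest.take k, true)

theorem rhs_step (ml mc : Int) (out : List String) (total : Int) (line : String) (rest : List String)
    (h : (out.length : Int) < ml)
    (hfit : total + (if out.isEmpty then 0 else 1) + PySem.Str.len line ≤ mc) :
    rhs ml mc out total (line :: rest) =
      rhs ml mc (out ++ [line]) (total + (if out.isEmpty then 0 else 1) + PySem.Str.len line) rest := by
  have hne : (out ++ [line]).isEmpty = false := by cases out <;> simp
  set mR := min (ml - ((out.length : Nat) : Int) - 1) ((rest.length : Nat) : Int) with hmRdef
  have hmL : min (ml - ((out.length : Nat) : Int)) (((line :: rest).length : Nat) : Int) = mR + 1 := by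
    rw [hmRdef]; simp only [List.length_cons]; push_cast; omega
  have hmRR : min (ml - (((out ++ [line]).length : Nat) : Int)) ((rest.length : Nat) : Int) = mR := by
    rw [hmRdef]; simp only [List.length_append, List.length_cons, List.length_nil]; push_cast; omega
  have hmR0 : 0 ≤ mR := by rw [hmRdef]; omega
  have htn : (mR + 1).toNat = mR.toNat + 1 := by omega
  simp only [rhs, hmL, hmRR, htn, List.take_succ_cons, prefs, hne]
  set a := total + (if out.isEmpty = true then 0 else 1) + PySem.Str.len line with ha
  set P := prefs (List.take mR.toNat rest) a false with hP
  set kR := P.countP (fun p => decide (p ≤ mc)) with hkR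
  have hstep : List.countP (fun p => decide (p ≤ mc)) (a :: P) = kR + 1 := by
    rw [hkR, List.countP_cons]; simp only [decide_eq_true hfit]; simp
  rw [hstep]
  have c1 : ((kR + 1 : Nat) : Int) = (((line :: rest).length : Nat) : Int) ↔
      ((kR : Nat) : Int) = ((rest.length : Nat) : Int) := by
    simp only [List.length_cons]; push_cast; constructor <;> (intro; omega)
  have c2 : ((kR + 1 : Nat) : Int) = ml - ((out.length : Nat) : Int) ↔
      ((kR : Nat) : Int) = ml - (((out ++ [line]).length : Nat) : Int) := by
    simp only [List.length_append, List.length_cons, List.length_nil]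
    push_cast; constructor <;> (intro; omega)
  simp only [c1, c2]
  by_cases hb1 : ((kR : Nat) : Int) = ((rest.length : Nat) : Int)
  · simp [hb1]
  · by_cases hb2 : ((kR : Nat) : Int) = ml - (((out ++ [line]).length : Nat) : Int)
    · simp [hb2, List.take_succ_cons]
    · have hb2' : ¬ ((kR : Int) = ml - ((out.length : Int) + 1)) := by
        intro hcon
        apply hb2
        simp only [List.length_append, List.length_cons, List.length_nil]
        push_cast
        omega
      have hgd2 : (a :: P)[kR]?.getD 0 = if kR = 0 then a else P[kR - 1]?.getD 0 := by
        cases kR with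
        | zero => simp
        | succ j => simp
      have hsep : (if kR + 1 = 0 ∧ out.isEmpty = true then (0 : Int) else 1) = 1 := by simp
      have hsep2 : (if kR = 0 ∧ (out ++ [line]).isEmpty = true then (0 : Int) else 1) = 1 := by
        simp [hne]
      simp [hb2', hgd2, List.take_succ_cons]

theorem greedy_eq_rhs (ml mc : Int) : ∀ (rest out : List String) (total : Int),
    (out.length : Int) ≤ ml →
    fenceGreedy ml mc out total rest = rhs ml mc out total rest := by
  intro rest
  induction rest with
  | nil =>
    intro out total _
    simp [fenceGreedy, rhs, prefs]
  | cons line rest ih =>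
    intro out total hle
    rw [fenceGreedy]
    by_cases hml : (out.length : Int) ≥ ml
    · -- line-limit branch: out.length = ml
      have hm : min (ml - (out.length : Int)) (((line :: rest).length : Nat) : Int) = 0 := by
        simp only [List.length_cons]
        push_cast
        omega
      rw [if_pos hml]
      simp only [rhs, hm]
      simp only [Int.toNat_zero, List.take_zero, prefs, List.countP_nil]
      have h1 : ((0 : Nat) : Int) ≠ (((line :: rest).length : Nat) : Int) := by
        simp only [List.length_cons]; push_cast; omega
      have h2 : ((0 : Nat) : Int) = ml - (out.length : Int) := by omega
      rw [if_neg h1, if_pos h2]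
      simp
    · rw [if_neg hml]
      by_cases hgt : total + (if out.isEmpty then 0 else 1) + PySem.Str.len line > mc
      · -- char-limit branch: the first prefix already exceeds mc, so k = 0
        rw [if_pos hgt]
        have hm1 : 0 < min (ml - (out.length : Int)) (((line :: rest).length : Nat) : Int) := by
          simp only [List.length_cons]; push_cast; omega
        have hm2 : (min (ml - (out.length : Int)) (((line :: rest).length : Nat) : Int)).toNat =
            ((min (ml - (out.length : Int)) (((line :: rest).length : Nat) : Int)).toNat - 1) + 1 := by
          omega
        simp only [rhs]
        rw [hm2, List.take_succ_cons]
        set a := total + (if out.isEmpty then 0 else 1) + PySem.Str.len line with ha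
        have hk : ∀ (tl : List String), (prefs (line :: tl) total out.isEmpty).countP (fun p => decide (p ≤ mc)) = 0 := by
          intro tl
          rw [List.countP_eq_zero]
          intro x hx
          simp only [prefs, List.mem_cons] at hx
          simp only [decide_eq_true_eq, not_le] at *
          rcases hx with hx | hx
          · omega
          · have := prefs_ge _ _ _ hx
            omega
        rw [hk]
        have h1 : ((0 : Nat) : Int) ≠ (((line :: rest).length : Nat) : Int) := by
          simp only [List.length_cons]; push_cast; omega
        have h2 : ((0 : Nat) : Int) ≠ ml - (out.length : Int) := by push_cast; omega
        rw [if_neg h1, if_neg h2]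
        by_cases he : out.isEmpty <;> simp [he]
      · rw [if_neg hgt]
        rw [ih (out ++ [line]) _ (by simp; omega)]
        exact (rhs_step ml mc out total line rest (by omega) (by omega)).symm

theorem prefs_take : ∀ (ls : List String) (j : Nat) (acc : Int) (e : Bool),
    prefs (ls.take j) acc e = (prefs ls acc e).take j := by
  intro ls
  induction ls with
  | nil => intro j acc e; simp [prefs]
  | cons l ls ih =>
    intro j acc e
    cases j with
    | zero => simp [prefs]
    | succ j => simp only [List.take_succ_cons, prefs, ih]

theorem prefs_length : ∀ (ls : List String) (acc : Int) (e : Bool),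
    (prefs ls acc e).length = ls.length := by
  intro ls
  induction ls with
  | nil => intro acc e; simp [prefs]
  | cons l ls ih => intro acc e; simp [prefs, ih]

theorem prefs_getD_ge_false : ∀ (ls : List String) (acc : Int) (i : Nat), i < ls.length →
    acc + i + 1 ≤ (prefs ls acc false).getD i 0 := by
  intro ls
  induction ls with
  | nil => intro acc i hi; simp at hi
  | cons l ls ih =>
    intro acc i hi
    have h0 := str_len_nonneg l
    cases i with
    | zero => simp [prefs]
    | succ i =>
      have hih := ih (acc + 1 + PySem.Str.len l) i (by simpa using hi)
      simp only [prefs, Bool.false_eq_true, if_false, List.getD_cons_succ]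
      push_cast
      omega

theorem prefs_getD_ge_true : ∀ (ls : List String) (acc : Int) (i : Nat), i < ls.length →
    acc + i ≤ (prefs ls acc true).getD i 0 := by
  intro ls acc i hi
  cases ls with
  | nil => simp at hi
  | cons l ls =>
    have h0 := str_len_nonneg l
    cases i with
    | zero => simp [prefs]
    | succ i =>
      have hf := prefs_getD_ge_false ls (acc + 0 + PySem.Str.len l) i (by simpa using hi)
      simp only [prefs, if_pos, List.getD_cons_succ]
      push_cast
      omega

theorem countP_take_stable (P : List Int) (mc : Int) (j2 j1 : Nat) (hle : j2 ≤ j1)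
    (hbig : ∀ i : Nat, j2 ≤ i → i < j1 → i < P.length → ¬ (P.getD i 0 ≤ mc)) :
    (P.take j2).countP (fun p => decide (p ≤ mc)) =
      (P.take j1).countP (fun p => decide (p ≤ mc)) := by
  have hsplit : P.take j1 = P.take j2 ++ (P.take j1).drop j2 := by
    conv_lhs => rw [← List.take_append_drop j2 (P.take j1)]
    rw [List.take_take, Nat.min_eq_left hle]
  rw [hsplit, List.countP_append]
  have hzero : ((P.take j1).drop j2).countP (fun p => decide (p ≤ mc)) = 0 := by
    rw [List.countP_eq_zero]
    intro x hx
    rw [List.mem_iff_getElem] at hx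
    obtain ⟨p, hp, hxe⟩ := hx
    simp only [List.getElem_drop, List.getElem_take] at hxe
    simp only [List.length_drop, List.length_take] at hp
    have hlt : j2 + p < P.length := by omega
    have hb := hbig (j2 + p) (by omega) (by omega) hlt
    rw [List.getD_eq_getElem _ _ hlt, hxe] at hb
    simpa using hb
  omega

set_option maxHeartbeats 1000000 in
theorem alt_eq_rhs (body : List String) (mlr mcr : Int) :
    fence_truncate_py_alt body mlr mcr = rhs (max 1 mlr) (max 1 mcr) [] 0 body := by
  have hml : (1 : Int) ≤ max 1 mlr := le_max_left _ _
  have hmc : (1 : Int) ≤ max 1 mcr := le_max_left _ _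
  have hbn : (0 : Int) ≤ ((body.length : Nat) : Int) := by positivity
  have h01 : 0 ≤ min (max 1 mlr) ((body.length : Nat) : Int) := by omega
  have h02 : 0 ≤ min (min (max 1 mlr) ((body.length : Nat) : Int)) (max 1 mcr + 1) := by omega
  have hle2 : (min (min (max 1 mlr) ((body.length : Nat) : Int)) (max 1 mcr + 1)).toNat ≤
      (min (max 1 mlr) ((body.length : Nat) : Int)).toNat := by omega
  have hidx : ∀ (i : Nat), i < (prefs body 0 true).length →
      (i : Int) ≤ (prefs body 0 true).getD i 0 := by
    intro i hi
    have := prefs_getD_ge_true body 0 i (by rwa [prefs_length] at hi)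
    omega
  -- the mc+1 cap changes neither the count of fitting prefixes nor the indexed entry:
  -- every entry beyond index mc is already longer than mc
  have hcnt := countP_take_stable (prefs body 0 true) (max 1 mcr)
    (min (min (max 1 mlr) ((body.length : Nat) : Int)) (max 1 mcr + 1)).toNat
    (min (max 1 mlr) ((body.length : Nat) : Int)).toNat hle2
    (by intro i hi1 hi2 hi3; have := hidx i hi3; omega)
  have hkm : ((prefs body 0 true).take
        (min (max 1 mlr) ((body.length : Nat) : Int)).toNat).countP
        (fun p => decide (p ≤ max 1 mcr)) ≤
      (min (min (max 1 mlr) ((body.length : Nat) : Int)) (max 1 mcr + 1)).toNat := by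
    rw [← hcnt]
    have h := List.countP_le_length (p := fun p => decide (p ≤ max 1 mcr))
      (l := (prefs body 0 true).take
        (min (min (max 1 mlr) ((body.length : Nat) : Int)) (max 1 mcr + 1)).toNat)
    rw [List.length_take] at h
    omega
  have hgd : ∀ (i : Nat),
      i < (min (min (max 1 mlr) ((body.length : Nat) : Int)) (max 1 mcr + 1)).toNat →
      ((prefs body 0 true).take
        (min (min (max 1 mlr) ((body.length : Nat) : Int)) (max 1 mcr + 1)).toNat)[i]? =
      ((prefs body 0 true).take (min (max 1 mlr) ((body.length : Nat) : Int)).toNat)[i]? := by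
    intro i hi
    rw [List.getElem?_take_of_lt hi, List.getElem?_take_of_lt (by omega)]
  simp only [fence_truncate_py_alt, rhs, List.length_nil, Nat.cast_zero, sub_zero,
    List.isEmpty_nil, List.nil_append, fenceB_pref_eq, PySem.List.slice_to _ h02,
    prefs_take, hcnt]
  set P := (prefs body 0 true).take (min (max 1 mlr) ((body.length : Nat) : Int)).toNat with hP
  set kN := P.countP (fun p => decide (p ≤ max 1 mcr)) with hkN
  have hk0 : (0 : Int) ≤ ((kN : Nat) : Int) := by positivity
  have hsl : PySem.List.slice body none (some ((kN : Nat) : Int)) = List.take kN body := by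
    rw [PySem.List.slice_to _ hk0]; simp
  have hpk : (if ((kN : Nat) : Int) = 0 then (0 : Int)
        else (PySem.List.pyGet? ((prefs body 0 true).take
          (min (min (max 1 mlr) ((body.length : Nat) : Int)) (max 1 mcr + 1)).toNat)
          (((kN : Nat) : Int) - 1)).getD 0) =
      (if kN = 0 then (0 : Int) else P.getD (kN - 1) 0) := by
    by_cases hz : kN = 0
    · simp [hz]
    · have hc1 : ((kN : Nat) : Int) - 1 = ((kN - 1 : Nat) : Int) := by omega
      have hcz : ¬ ((kN : Nat) : Int) = 0 := by omega
      have hgd1 := hgd (kN - 1) (by omega)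
      simp only [hcz, hc1, hz, if_false, PySem.List.pyGet?_natCast, List.getD_eq_getElem?_getD]
      rw [hgd1]
  have hsep : (if ((kN : Nat) : Int) = 0 then (0 : Int) else 1) =
      (if kN = 0 ∧ ([] : List String).isEmpty = true then (0 : Int) else 1) := by
    by_cases hz : kN = 0 <;> simp [hz]
  have hget : (PySem.List.pyGet? body ((kN : Nat) : Int)).getD "" = body.getD kN "" := by
    simp [List.getD_eq_getElem?_getD]
  simp only [hsl, hpk, hsep, hget]
  split_ifs <;> first | rfl | omega | simp_all

-- ===== VERDICT (by name: the statement is the Claim_ definition above) =====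
theorem fence_truncate_py_spec : Claim_equal_fence_truncate_py := by
  intro body_lines max_lines max_chars _
  unfold Spec_fence_truncate_py fence_truncate_py
  rw [goAB, len_join_nil, greedy_eq_rhs _ _ _ _ _ (by simp), alt_eq_rhs]
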